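-- pv_equiv track=rewrite | github.com/ParticipaPY/politic-bots | heuristics/fake_promoter.py | computations_num_interactions
-- ===== SOURCE A (Python) =====
-- def computations_num_interactions(user_screen_name
--     , NUM_INTERACTED_USERS_HEUR, interactions):
--     """
--     Compute values related to the no. interactions of a user.
--
--     The values to be computed are:
--         - The total number of users
--         that the user 'user_screen_name'
--         started an interaction with
--         (Not counting interactions with him/herself).
--         - The total number of interactions started by a user.
--         - The number of interactions
--         with the NUM_INTERACTED_USERS_HEUR most interacted users.
--
--     Parameters
--     ----------
--     user_screen_name : Screen name of the user
--     that is being evaluated in the heuristic.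
--
--     NUM_INTERACTED_USERS_HEUR : Number of interacted-users to consider
--     for the specified heuristic's computations.
--
--     interactions : List of tuples.
--     The first element is the screen name of an interacted user
--     and the second is the number of interactions with her/him.
--
--     Returns
--     -------
--     totals_dict : The totals needed by the heuristic
--     , encapsulated in a dictionary.
--     """
--     interacted_users_count = 0
--     total_interactions = 0
--     total_top_interactions = 0
--     totals_dict = {}
--     for interaction_with, interaction_count in interactions:
--         # We only care about top NUM_INTERACTED_USERS_HEUR users
--         # different from the analyzed user for these accumulators
--         if (interacted_users_count < NUM_INTERACTED_USERS_HEUR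
--                 and interaction_with != user_screen_name):
--             interacted_users_count += 1
--             total_top_interactions += interaction_count
--         # Accumulate no. interactions with all users
--         total_interactions += interaction_count
--     totals_dict["interacted_users_count"] = interacted_users_count
--     totals_dict["total_interactions"] = total_interactions
--     totals_dict["total_top_interactions"] = total_top_interactions
--     return totals_dict
-- ===== SOURCE B (Python) =====
-- def computations_num_interactions(user_screen_name, NUM_INTERACTED_USERS_HEUR, interactions):
--     total_interactions = sum(c for _, c in interactions)
--     non_self = [c for name, c in interactions if name != user_screen_name]
--     top = non_self[:max(NUM_INTERACTED_USERS_HEUR, 0)]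
--     return {
--         "interacted_users_count": len(top),
--         "total_interactions": total_interactions,
--         "total_top_interactions": sum(top),
--     }
-- ===== Notes on version B (the rewrite author's own statement) =====
-- stated objective: simpler
-- what changed: Replaces the single interleaved loop with three accumulators by separate declarative passes: a sum for the grand total, a filter of non-self counts, and a prefix slice (max(NUM,0)) whose length and sum give the top-user figures.
import Mathlib
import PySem

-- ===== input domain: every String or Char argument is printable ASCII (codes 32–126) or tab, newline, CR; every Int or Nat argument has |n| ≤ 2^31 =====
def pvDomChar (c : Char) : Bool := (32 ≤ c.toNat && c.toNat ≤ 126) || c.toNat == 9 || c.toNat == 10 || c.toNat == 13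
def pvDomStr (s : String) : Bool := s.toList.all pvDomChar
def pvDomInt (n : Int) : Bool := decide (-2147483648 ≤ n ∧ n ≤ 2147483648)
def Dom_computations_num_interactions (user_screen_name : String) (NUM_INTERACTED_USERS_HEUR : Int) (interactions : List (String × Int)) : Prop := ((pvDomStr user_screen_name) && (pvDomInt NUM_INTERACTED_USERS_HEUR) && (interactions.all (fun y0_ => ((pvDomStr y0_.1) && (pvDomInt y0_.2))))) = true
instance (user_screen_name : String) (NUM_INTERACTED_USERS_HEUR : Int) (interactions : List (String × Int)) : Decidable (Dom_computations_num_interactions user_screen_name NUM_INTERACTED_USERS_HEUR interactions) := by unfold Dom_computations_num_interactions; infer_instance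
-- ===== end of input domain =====

-- B replaces A's single interleaved three-accumulator loop by separate passes
-- (a total sum, a filter of non-self counts, and a prefix slice); objective: simpler.

-- ===== PORT A =====
-- the loop body of A: state (interacted_users_count, total_interactions, total_top_interactions)
def pvStepA (user_screen_name : String) (NUM_INTERACTED_USERS_HEUR : Int)
    (st : Int × Int × Int) (p : String × Int) : Int × Int × Int :=
  let (cnt, tot, topTot) := st
  if cnt < NUM_INTERACTED_USERS_HEUR ∧ p.1 ≠ user_screen_name then
    (cnt + 1, tot + p.2, topTot + p.2)
  else
    (cnt, tot + p.2, topTot)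

def computations_num_interactions (user_screen_name : String) (NUM_INTERACTED_USERS_HEUR : Int) (interactions : List (String × Int)) : List (String × Int) :=
  let st := interactions.foldl (pvStepA user_screen_name NUM_INTERACTED_USERS_HEUR) (0, 0, 0)
  [("interacted_users_count", st.1),
   ("total_interactions", st.2.1),
   ("total_top_interactions", st.2.2)]

-- ===== PORT B =====
def computations_num_interactions_alt (user_screen_name : String) (NUM_INTERACTED_USERS_HEUR : Int) (interactions : List (String × Int)) : List (String × Int) :=
  let total_interactions := (interactions.map Prod.snd).sum
  let non_self := interactions.filterMap (fun p => if p.1 ≠ user_screen_name then some p.2 else none)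
  let top := non_self.take (max NUM_INTERACTED_USERS_HEUR 0).toNat
  [("interacted_users_count", (top.length : Int)),
   ("total_interactions", total_interactions),
   ("total_top_interactions", top.sum)]

-- ===== PRECONDITION & SPEC =====
def Spec_computations_num_interactions (user_screen_name : String) (NUM_INTERACTED_USERS_HEUR : Int) (interactions : List (String × Int)) (out : List (String × Int)) : Prop := out = computations_num_interactions_alt user_screen_name NUM_INTERACTED_USERS_HEUR interactions
instance (user_screen_name : String) (NUM_INTERACTED_USERS_HEUR : Int) (interactions : List (String × Int)) (out : List (String × Int)) : Decidable (Spec_computations_num_interactions user_screen_name NUM_INTERACTED_USERS_HEUR interactions out) := by unfold Spec_computations_num_interactions; infer_instance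

-- ===== CLAIM (what is proved, stated in full; the proofs are below) =====
def Claim_equal_computations_num_interactions : Prop := ∀ (user_screen_name : String) (NUM_INTERACTED_USERS_HEUR : Int) (interactions : List (String × Int)), Dom_computations_num_interactions user_screen_name NUM_INTERACTED_USERS_HEUR interactions → Spec_computations_num_interactions user_screen_name NUM_INTERACTED_USERS_HEUR interactions (computations_num_interactions user_screen_name NUM_INTERACTED_USERS_HEUR interactions)

-- ===== LEMMAS AND PROOFS =====

-- the invariant of A's loop: from state (c0,t0,tt0) the fold adds the length/sum of the
-- prefix of the remaining non-self counts that still fits in the capacity N - c0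
theorem pvFoldA_eq (user : String) (N : Int) (l : List (String × Int)) :
    ∀ (c0 t0 tt0 : Int),
      l.foldl (pvStepA user N) (c0, t0, tt0) =
        (c0 + (((l.filterMap (fun p => if p.1 ≠ user then some p.2 else none)).take (N - c0).toNat).length : Int),
         t0 + (l.map Prod.snd).sum,
         tt0 + ((l.filterMap (fun p => if p.1 ≠ user then some p.2 else none)).take (N - c0).toNat).sum) := by
  induction l with
  | nil => intro c0 t0 tt0; simp
  | cons hd tl ih =>
    intro c0 t0 tt0
    by_cases hne : hd.1 ≠ user
    · by_cases hlt : c0 < N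
      · have hk : (N - c0).toNat = (N - (c0 + 1)).toNat + 1 := by omega
        rw [List.foldl_cons,
          show pvStepA user N (c0, t0, tt0) hd = (c0 + 1, t0 + hd.2, tt0 + hd.2) from by
            simp [pvStepA, hlt, hne],
          ih]
        simp only [List.filterMap_cons, if_pos hne, hk, List.take_succ_cons,
          List.length_cons, List.sum_cons, List.map_cons, Prod.mk.injEq]
        refine ⟨by push_cast; ring, by ring, by ring⟩
      · have hk : (N - c0).toNat = 0 := by omega
        rw [List.foldl_cons,
          show pvStepA user N (c0, t0, tt0) hd = (c0, t0 + hd.2, tt0) from by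
            simp [pvStepA, hlt],
          ih]
        have hk2 : (N - c0).toNat = 0 := hk
        simp only [List.filterMap_cons, if_pos hne, hk2, List.take_zero,
          List.length_nil, List.sum_nil, List.map_cons, List.sum_cons, Prod.mk.injEq]
        refine ⟨?_, ?_, ?_⟩ <;> first | trivial | ring
    · rw [List.foldl_cons,
        show pvStepA user N (c0, t0, tt0) hd = (c0, t0 + hd.2, tt0) from by
          simp only [pvStepA]; rw [if_neg (by intro h; exact hne h.2)],
        ih]
      simp only [List.filterMap_cons, if_neg hne, List.map_cons, List.sum_cons,
        Prod.mk.injEq]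
      refine ⟨?_, ?_, ?_⟩ <;> first | trivial | ring

-- ===== VERDICT (by name: the statement is the Claim_ definition above) =====
theorem computations_num_interactions_spec : Claim_equal_computations_num_interactions := by
  intro user N l _
  unfold Spec_computations_num_interactions computations_num_interactions computations_num_interactions_alt
  have h := pvFoldA_eq user N l 0 0 0
  have hmax : (max N 0).toNat = (N - 0).toNat := by omega
  simp only [h, hmax]
  simp
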